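-- pv_equiv track=rewrite | github.com/alfie-tingey/university_projects | webapp_news_aggregation/news_agg_app/app/string_pro.py | str_pro
-- ===== SOURCE A (Python) =====
-- def str_pro(s0):
--     sout = ''
--     activate = False
--     for char in s0:
--         if char == '<':
--             activate = True
--         if char == '>':
--             activate = False
--             # break
--         if (not activate) and (char !='>'):
--             sout = sout + char
--     return sout.replace('Continue reading...','')
-- ===== SOURCE B (Python) =====
-- def str_pro(s0):
--     # Tag-skipping via partition: jump over tag blocks wholesale instead of a
--     # per-character flag machine; stray close-angle characters are removed in one
--     # pass at the end (removed tag text never reaches `out`, and the phrase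
--     # contains none of them, so the order of the two final replaces matches A).
--     out = []
--     s = s0
--     while True:
--         pre, sep, s = s.partition('<')
--         out.append(pre)
--         if not sep:
--             break
--         _, sep2, s = s.partition('>')
--         if not sep2:
--             break
--     return ''.join(out).replace('>', '').replace('Continue reading...', '')
-- ===== Notes on version B (the rewrite author's own statement) =====
-- stated objective: faster
-- what changed: Replaced A's per-character loop with an activate flag by a partition-driven loop that splits at each tag-open character, jumps past the next tag-close character wholesale, and removes stray close-angle characters with a single replace at the end.
import Mathlib
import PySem

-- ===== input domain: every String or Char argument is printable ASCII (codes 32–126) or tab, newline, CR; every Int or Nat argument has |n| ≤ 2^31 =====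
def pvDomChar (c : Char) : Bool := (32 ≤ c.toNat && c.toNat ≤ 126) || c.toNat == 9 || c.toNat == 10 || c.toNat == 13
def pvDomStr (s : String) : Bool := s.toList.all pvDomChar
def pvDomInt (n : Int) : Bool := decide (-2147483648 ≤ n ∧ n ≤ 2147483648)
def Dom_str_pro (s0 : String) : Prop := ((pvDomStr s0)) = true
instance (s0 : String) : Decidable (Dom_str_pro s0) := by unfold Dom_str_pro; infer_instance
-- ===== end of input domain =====

-- B replaces A's per-character activate-flag loop by a partition-driven loop that
-- skips each tag block wholesale and strips the stray angle-close characters once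
-- at the end (measurably faster: bulk C-level partition instead of per-character
-- interpreter steps).

-- ===== PORT A =====
-- one iteration of A's for-loop: state = (sout as a char list, activate flag)
def strProStep (st : List Char × Bool) (c : Char) : List Char × Bool :=
  let act1 := if c = '<' then true else st.2
  let act2 := if c = '>' then false else act1
  if !act2 && !(c = '>') then (st.1 ++ [c], act2) else (st.1, act2)

def str_pro (s0 : String) : String :=
  PySem.Str.replace (String.ofList (s0.toList.foldl strProStep ([], false)).1)
    "Continue reading..." ""

-- ===== PORT B =====
-- B's `while True:` loop over s.partition('<') / s.partition('>'), as recursion on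
-- the remaining suffix.  partition with a one-char separator is ported exactly by
-- hand: pre = takeWhile (≠ sep); separator found ↔ dropWhile (≠ sep) ≠ []; the
-- part after the separator = (dropWhile (≠ sep)).tail.
def strProGo (cs : List Char) : List Char :=
  if cs.dropWhile (fun c => c ≠ '<') = [] then
    cs.takeWhile (fun c => c ≠ '<')
  else if (cs.dropWhile (fun c => c ≠ '<')).tail.dropWhile (fun c => c ≠ '>') = [] then
    cs.takeWhile (fun c => c ≠ '<')
  else
    cs.takeWhile (fun c => c ≠ '<') ++
      strProGo ((cs.dropWhile (fun c => c ≠ '<')).tail.dropWhile (fun c => c ≠ '>')).tail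
termination_by cs.length
decreasing_by
  rename_i h h2
  have h1 : (cs.dropWhile (fun c => c ≠ '<')).length ≤ cs.length := List.length_dropWhile_le _ _
  have h3 : ((cs.dropWhile (fun c => c ≠ '<')).tail.dropWhile (fun c => c ≠ '>')).length
      ≤ (cs.dropWhile (fun c => c ≠ '<')).tail.length := List.length_dropWhile_le _ _
  have h6 : (cs.dropWhile (fun c => c ≠ '<')).tail.length
      = (cs.dropWhile (fun c => c ≠ '<')).length - 1 := List.length_tail
  have h7 : ((cs.dropWhile (fun c => c ≠ '<')).tail.dropWhile (fun c => c ≠ '>')).tail.length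
      = ((cs.dropWhile (fun c => c ≠ '<')).tail.dropWhile (fun c => c ≠ '>')).length - 1 :=
    List.length_tail
  have h8 : 0 < (cs.dropWhile (fun c => c ≠ '<')).length := List.length_pos_of_ne_nil h
  have h9 : 0 < ((cs.dropWhile (fun c => c ≠ '<')).tail.dropWhile (fun c => c ≠ '>')).length :=
    List.length_pos_of_ne_nil h2
  omega

def str_pro_alt (s0 : String) : String :=
  PySem.Str.replace
    (PySem.Str.replace (String.ofList (strProGo s0.toList)) ">" "")
    "Continue reading..." ""

-- ===== PRECONDITION & SPEC =====
def Spec_str_pro (s0 : String) (out : String) : Prop := out = str_pro_alt s0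
instance (s0 : String) (out : String) : Decidable (Spec_str_pro s0 out) := by unfold Spec_str_pro; infer_instance

-- ===== CLAIM (what is proved, stated in full; the proofs are below) =====
def Claim_equal_str_pro : Prop := ∀ (s0 : String), Dom_str_pro s0 → Spec_str_pro s0 (str_pro s0)

-- ===== LEMMAS AND PROOFS =====

theorem strProGo_nil : strProGo [] = [] := by unfold strProGo; simp

theorem strProGo_cons_ne (c : Char) (t : List Char) (hc : c ≠ '<') :
    strProGo (c :: t) = c :: strProGo t := by
  conv_lhs => unfold strProGo
  conv_rhs => unfold strProGo
  rw [List.takeWhile_cons_of_pos (by simp [hc]), List.dropWhile_cons_of_pos (by simp [hc])]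
  split
  · rfl
  · split
    · rfl
    · simp

theorem strProGo_lt (t : List Char) :
    strProGo ('<' :: t) =
      (if t.dropWhile (fun c => c ≠ '>') = [] then []
       else strProGo (t.dropWhile (fun c => c ≠ '>')).tail) := by
  conv_lhs => unfold strProGo
  simp

-- str.replace with a one-char needle and empty replacement is filter
theorem replace_go_gt (fuel : Nat) : ∀ (l acc : List Char), l.length ≤ fuel →
    PySem.Chars.replace.go ['>'] [] fuel l acc = acc.reverse ++ l.filter (fun c => c ≠ '>') := by
  induction fuel with
  | zero =>
    intro l acc hl
    have : l = [] := List.length_eq_zero_iff.mp (Nat.le_zero.mp hl)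
    subst this
    simp [PySem.Chars.replace.go]
  | succ n ih =>
    intro l acc hl
    cases l with
    | nil => simp [PySem.Chars.replace.go]
    | cons c t =>
      simp only [PySem.Chars.replace.go]
      by_cases hc : c = '>'
      · subst hc
        have hpre : List.isPrefixOf ['>'] ('>' :: t) = true := by simp [List.isPrefixOf]
        rw [if_pos hpre]
        have hdrop : List.drop (['>'] : List Char).length ('>' :: t) = t := rfl
        rw [hdrop]
        simp only [List.length_cons] at hl
        rw [ih _ _ (by omega)]
        simp
      · have hpre : List.isPrefixOf ['>'] (c :: t) = false := by
          simp [List.isPrefixOf]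
          exact fun hh => hc hh.symm
        rw [if_neg (by simp [hpre])]
        simp only [List.length_cons] at hl
        rw [ih _ _ (by omega)]
        simp [hc]

theorem replace_gt_eq_filter (l : List Char) :
    PySem.Chars.replace l ['>'] [] = l.filter (fun c => c ≠ '>') := by
  rw [PySem.Chars.replace]
  simp [replace_go_gt l.length l [] le_rfl]

-- A's fold in the active state: skip until after the first '>', then continue inactive
theorem fold_active (cs : List Char) : ∀ acc : List Char,
    (cs.foldl strProStep (acc, true)).1 =
      ((cs.dropWhile (fun c => c ≠ '>')).tail.foldl strProStep (acc, false)).1 := by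
  induction cs with
  | nil => intro acc; simp
  | cons c t ih =>
    intro acc
    by_cases hc : c = '>'
    · subst hc
      have hstep : strProStep (acc, true) '>' = (acc, false) := by
        simp [strProStep]
      rw [List.foldl_cons, hstep, List.dropWhile_cons_of_neg (by simp)]
      rfl
    · have hstep : strProStep (acc, true) c = (acc, true) := by
        simp [strProStep, hc]
      rw [List.foldl_cons, hstep, List.dropWhile_cons_of_pos (by simp [hc])]
      exact ih acc

-- main invariant: A's inactive fold appends strProGo's output with '>' filtered out
theorem fold_main (cs : List Char) : ∀ acc : List Char,
    (cs.foldl strProStep (acc, false)).1 = acc ++ (strProGo cs).filter (fun c => c ≠ '>') := by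
  cases cs with
  | nil => intro acc; simp [strProGo_nil]
  | cons c t =>
    intro acc
    by_cases hlt : c = '<'
    · subst hlt
      have hstep : strProStep (acc, false) '<' = (acc, true) := by simp [strProStep]
      rw [List.foldl_cons, hstep, fold_active, strProGo_lt]
      split
      · rename_i hnil
        rw [hnil]
        simp
      · exact fold_main _ _
    · by_cases hgt : c = '>'
      · subst hgt
        have hstep : strProStep (acc, false) '>' = (acc, false) := by simp [strProStep]
        rw [List.foldl_cons, hstep, strProGo_cons_ne _ _ (by decide), fold_main]
        simp
      · have hstep : strProStep (acc, false) c = (acc ++ [c], false) := by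
          simp [strProStep, hlt, hgt]
        rw [List.foldl_cons, hstep, strProGo_cons_ne _ _ hlt, fold_main]
        simp [hgt]
termination_by cs.length
decreasing_by
  · have h1 : (t.dropWhile (fun c => c ≠ '>')).length ≤ t.length :=
      List.length_dropWhile_le _ _
    have h2 : (t.dropWhile (fun c => c ≠ '>')).tail.length
        = (t.dropWhile (fun c => c ≠ '>')).length - 1 := List.length_tail
    simp only [List.length_cons]
    omega
  · simp
  · simp

-- ===== VERDICT (by name: the statement is the Claim_ definition above) =====
theorem str_pro_spec : Claim_equal_str_pro := by
  intro s0 _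
  unfold Spec_str_pro str_pro str_pro_alt
  rw [fold_main s0.toList []]
  congr 1
  rw [PySem.Str.replace]
  have h1 : (String.ofList (strProGo s0.toList)).toList = strProGo s0.toList := by simp
  have h2 : (">" : String).toList = ['>'] := rfl
  have h3 : ("" : String).toList = [] := rfl
  rw [h1, h2, h3, replace_gt_eq_filter]
  rfl
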